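-- pv_equiv track=rewrite | github.com/dpkingston/beagle_rdf | scripts/prototype_rds_sync.py | compute_rds_crc_syndrome
-- ===== SOURCE A (Python) =====
-- _RDS_POLY = 0x1B9
--
-- def compute_rds_crc_syndrome(bits_26: int) -> int:
--     """Compute the RDS CRC-10 syndrome for a 26-bit block."""
--     reg = 0
--     for i in range(25, -1, -1):
--         bit = (bits_26 >> i) & 1
--         fb = ((reg >> 9) & 1) ^ bit
--         reg = ((reg << 1) & 0x3FF)
--         if fb:
--             reg ^= _RDS_POLY
--     return reg
-- ===== SOURCE B (Python) =====
-- _RDS_POLY = 0x1B9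
--
-- # CRC over GF(2) is linear, so the syndrome of a block is the XOR of the
-- # syndromes of its set bits; entry i is the syndrome of the block 1 << i.
-- _BIT_SYNDROMES = [
--     441, 882, 861, 771, 959, 711, 55, 110, 220, 440, 880, 857, 779,
--     943, 743, 119, 238, 476, 952, 713, 43, 86, 172, 344, 688, 217,
-- ]
--
--
-- def compute_rds_crc_syndrome(bits_26: int) -> int:
--     """Compute the RDS CRC-10 syndrome for a 26-bit block."""
--     s = 0
--     for i, c in enumerate(_BIT_SYNDROMES):
--         if (bits_26 >> i) & 1:
--             s ^= c
--     return s
-- ===== Notes on version B (the rewrite author's own statement) =====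
-- stated objective: alternative
-- what changed: Replaces the bit-serial CRC shift register with a precomputed per-bit syndrome table, XOR-combining the table entries of the set bits (linearity of CRC over GF(2)).
import Mathlib
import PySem

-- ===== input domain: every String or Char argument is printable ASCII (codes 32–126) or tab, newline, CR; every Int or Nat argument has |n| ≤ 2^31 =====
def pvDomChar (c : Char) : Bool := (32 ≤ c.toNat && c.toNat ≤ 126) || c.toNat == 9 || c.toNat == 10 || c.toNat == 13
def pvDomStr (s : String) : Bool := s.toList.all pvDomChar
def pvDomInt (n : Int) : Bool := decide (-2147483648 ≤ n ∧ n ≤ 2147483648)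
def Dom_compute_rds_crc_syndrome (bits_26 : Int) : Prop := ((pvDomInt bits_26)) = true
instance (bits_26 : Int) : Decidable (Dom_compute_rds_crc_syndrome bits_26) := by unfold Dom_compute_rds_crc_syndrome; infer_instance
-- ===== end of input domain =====

-- B replaces A's bit-serial CRC shift register by XORing precomputed per-bit syndromes of the set bits (CRC linearity); same exact result.

-- ===== PORT A =====
-- loop body of A's `for i in range(25, -1, -1)` register update
def stepA (bits_26 reg i : Int) : Int :=
  let bit := PySem.Int.band (bits_26 >>> i.toNat) 1
  let fb := PySem.Int.bxor (PySem.Int.band (reg >>> 9) 1) bit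
  let reg2 := PySem.Int.band (reg <<< 1) 1023
  if fb ≠ 0 then PySem.Int.bxor reg2 441 else reg2

def compute_rds_crc_syndrome (bits_26 : Int) : Int :=
  (PySem.List.pyRange 25 (-1) (-1)).foldl (stepA bits_26) 0

-- ===== PORT B =====
-- _BIT_SYNDROMES from Source B
def rdsBitSyndromes : List Int :=
  [441, 882, 861, 771, 959, 711, 55, 110, 220, 440, 880, 857, 779,
   943, 743, 119, 238, 476, 952, 713, 43, 86, 172, 344, 688, 217]

-- loop body of B's `for i, c in enumerate(_BIT_SYNDROMES)` accumulation
def stepB (bits_26 s : Int) (ic : Int × Int) : Int :=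
  if PySem.Int.band (bits_26 >>> ic.1.toNat) 1 ≠ 0 then PySem.Int.bxor s ic.2 else s

def compute_rds_crc_syndrome_alt (bits_26 : Int) : Int :=
  (PySem.List.enumerate rdsBitSyndromes).foldl (stepB bits_26) 0

-- ===== PRECONDITION & SPEC =====
def Spec_compute_rds_crc_syndrome (bits_26 : Int) (out : Int) : Prop := out = compute_rds_crc_syndrome_alt bits_26
instance (bits_26 : Int) (out : Int) : Decidable (Spec_compute_rds_crc_syndrome bits_26 out) := by unfold Spec_compute_rds_crc_syndrome; infer_instance

-- ===== CLAIM (what is proved, stated in full; the proofs are below) =====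
def Claim_equal_compute_rds_crc_syndrome : Prop := ∀ (bits_26 : Int), Dom_compute_rds_crc_syndrome bits_26 → Spec_compute_rds_crc_syndrome bits_26 (compute_rds_crc_syndrome bits_26)

-- ===== LEMMAS AND PROOFS =====
-- Nat model of A's register step
def stepN (reg b : Nat) : Nat :=
  let r := (reg <<< 1) &&& 1023
  if ((reg >>> 9) &&& 1) ^^^ b ≠ 0 then r ^^^ 441 else r

def runA (r : Nat) (bs : List Nat) : Nat := bs.foldl stepN r

def zeros : Nat → List Nat
  | 0 => []
  | k + 1 => 0 :: zeros k

def Ctab (k : Nat) : Nat := runA 441 (zeros k)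

def S : List Nat → Nat
  | [] => 0
  | b :: bs => (if b ≠ 0 then Ctab bs.length else 0) ^^^ S bs

def bitN (m i : Nat) : Nat := (m >>> i) &&& 1

def mval (n : Int) : Nat := (n % 67108864).toNat


theorem xor_left_comm (a b c : Nat) : a ^^^ (b ^^^ c) = b ^^^ (a ^^^ c) := by
  rw [← Nat.xor_assoc, Nat.xor_comm a b, Nat.xor_assoc]

theorem xor_cancel (a b : Nat) : a ^^^ (a ^^^ b) = b := by
  rw [← Nat.xor_assoc, Nat.xor_self, Nat.zero_xor]

theorem and1_cases (x : Nat) : x &&& 1 = 0 ∨ x &&& 1 = 1 := by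
  have : x &&& 1 ≤ 1 := Nat.and_le_right
  omega

theorem sr_xor (x y : Nat) : ((x ^^^ y) >>> 9) &&& 1 = ((x >>> 9) &&& 1) ^^^ ((y >>> 9) &&& 1) := by
  apply Nat.eq_of_testBit_eq
  intro i
  simp only [Nat.testBit_and, Nat.testBit_xor, Nat.testBit_shiftRight, Bool.and_xor_distrib_right]

theorem sl_xor (x y : Nat) :
    ((x ^^^ y) <<< 1) &&& 1023 = ((x <<< 1) &&& 1023) ^^^ ((y <<< 1) &&& 1023) := by
  apply Nat.eq_of_testBit_eq
  intro i
  simp only [Nat.testBit_and, Nat.testBit_xor, Nat.testBit_shiftLeft, Bool.and_xor_distrib_right,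
    Bool.and_xor_distrib_left]

theorem step0_lin (x y : Nat) : stepN (x ^^^ y) 0 = stepN x 0 ^^^ stepN y 0 := by
  unfold stepN
  simp only [Nat.xor_zero, sr_xor, sl_xor]
  rcases and1_cases (x >>> 9) with hx | hx <;> rcases and1_cases (y >>> 9) with hy | hy <;>
    rw [hx, hy] <;> simp [Nat.xor_assoc, Nat.xor_comm, xor_left_comm, xor_cancel]

theorem step_split (r b : Nat) (hb : b ≤ 1) :
    stepN r b = stepN r 0 ^^^ (if b ≠ 0 then 441 else 0) := by
  unfold stepN
  have hb01 : b = 0 ∨ b = 1 := by omega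
  rcases hb01 with hb0 | hb0 <;> subst hb0 <;>
    rcases and1_cases (r >>> 9) with hr | hr <;>
    simp [hr, Nat.xor_assoc, Nat.xor_comm, xor_left_comm, xor_cancel]

theorem runA_zeros_lin (k : Nat) : ∀ x y, runA (x ^^^ y) (zeros k) = runA x (zeros k) ^^^ runA y (zeros k) := by
  induction k with
  | zero => intro x y; simp [runA, zeros]
  | succ k ih =>
    intro x y
    simp only [zeros, runA, List.foldl_cons]
    rw [step0_lin]
    exact ih _ _

theorem runA_zeros_zero (k : Nat) : runA 0 (zeros k) = 0 := by
  induction k with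
  | zero => rfl
  | succ k ih => simpa [runA, zeros, List.foldl_cons, stepN] using ih

theorem runA_eq_S (bs : List Nat) : ∀ r, (∀ b ∈ bs, b ≤ 1) →
    runA r bs = runA r (zeros bs.length) ^^^ S bs := by
  induction bs with
  | nil => intro r _; simp [runA, zeros, S]
  | cons b bs ih =>
    intro r h
    have hb : b ≤ 1 := h b List.mem_cons_self
    have hbs : ∀ x ∈ bs, x ≤ 1 := fun x hx => h x (List.mem_cons_of_mem _ hx)
    have h1 : runA r (b :: bs) = runA (stepN r b) bs := by simp [runA]
    have h2 : runA r (zeros (b :: bs).length) = runA (stepN r 0) (zeros bs.length) := by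
      simp [runA, zeros]
    rw [h1, ih _ hbs, h2, step_split r b hb, runA_zeros_lin]
    have h3 : runA (if b ≠ 0 then 441 else 0) (zeros bs.length)
        = (if b ≠ 0 then Ctab bs.length else 0) := by
      by_cases hb0 : b ≠ 0 <;> simp [hb0, Ctab, runA_zeros_zero]
    rw [h3, S]
    simp [Nat.xor_assoc]

theorem runA_zero_eq_S (bs : List Nat) (h : ∀ b ∈ bs, b ≤ 1) : runA 0 bs = S bs := by
  rw [runA_eq_S bs 0 h, runA_zeros_zero, Nat.zero_xor]

theorem bit_bridge (n : Int) (i : Nat) (hi : i < 26) :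
    PySem.Int.band (n >>> i) 1 = ((bitN (mval n) i : Nat) : Int) := by
  rw [PySem.Int.band_one, PySem.Int.mod_eq_emod_of_pos (by omega)]
  rw [Int.shiftRight_eq_div_pow]
  unfold bitN mval
  rw [Nat.and_one_is_mod, Nat.shiftRight_eq_div_pow]
  have h0 : (0:Int) ≤ n % 67108864 := Int.emod_nonneg n (by omega)
  push_cast [Int.toNat_of_nonneg h0]
  have hNat : (2:Nat) ^ i * 2 ^ (26 - i) = 2 ^ 26 := by
    rw [← Nat.pow_add]
    congr 1
    omega
  have hsplit : (67108864:Int) = 2 ^ i * 2 ^ (26 - i) := by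
    calc (67108864:Int) = ((2 ^ 26 : Nat) : Int) := by decide
      _ = ((2 ^ i * 2 ^ (26 - i) : Nat) : Int) := by rw [hNat]
      _ = (2:Int) ^ i * 2 ^ (26 - i) := by push_cast; rfl
  have h2q : ∃ c : Int, (2:Int) ^ (26 - i) = 2 * c := by
    refine ⟨2 ^ (25 - i), ?_⟩
    have hN : (2:Nat) ^ (26 - i) = 2 * 2 ^ (25 - i) := by
      have h : 26 - i = (25 - i) + 1 := by omega
      rw [h, Nat.pow_succ]
      omega
    calc (2:Int) ^ (26 - i) = ((2 ^ (26 - i) : Nat) : Int) := by push_cast; rfl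
      _ = ((2 * 2 ^ (25 - i) : Nat) : Int) := by rw [hN]
      _ = 2 * (2:Int) ^ (25 - i) := by push_cast; rfl
  obtain ⟨c, hc⟩ := h2q
  rw [show n % 67108864 = n - 67108864 * (n / 67108864) from Int.emod_def n 67108864]
  generalize n / 67108864 = k
  rw [hsplit, Int.sub_eq_add_neg, Int.mul_assoc, ← Int.mul_neg]
  have hpne : (2:Int) ^ i ≠ 0 := by
    intro h
    have h' : ((2 ^ i : Nat) : Int) = 0 := by push_cast; exact h
    have h2 : (2:Nat) ^ i = 0 := by exact_mod_cast h'
    have h3 := Nat.two_pow_pos i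
    omega
  rw [Int.add_mul_ediv_left n _ hpne, hc, Int.mul_assoc]
  generalize n / 2 ^ i = X
  generalize c * k = t
  omega

theorem step_bridge (n : Int) (r : Nat) (i : Nat) (hi : i < 26) :
    stepA n (↑r) (↑i) = ↑(stepN r (bitN (mval n) i)) := by
  simp only [stepA, stepN]
  rw [Int.toNat_natCast, bit_bridge n i hi]
  rw [show ((r:Int) >>> 9) = ((r >>> 9 : Nat) : Int) from (Int.natCast_shiftRight r 9).symm]
  rw [show ((r:Int) <<< 1) = ((r <<< 1 : Nat) : Int) from (Int.natCast_shiftLeft r 1).symm]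
  rw [show ((1:Int)) = ((1:Nat):Int) from rfl, show ((1023:Int)) = ((1023:Nat):Int) from rfl]
  rw [PySem.Int.band_natCast, PySem.Int.band_natCast, PySem.Int.bxor_natCast]
  have h441 : (441:Int) = ((441:Nat):Int) := rfl
  simp only [Ne, Int.natCast_eq_zero]
  simp only [Nat.and_one_is_mod]
  by_cases h : (r >>> 9 % 2) ^^^ bitN (mval n) i = 0
  · simp [h]
  · rw [if_pos h, if_pos h, h441, PySem.Int.bxor_natCast]

def bitsIdx : List Nat := [25,24,23,22,21,20,19,18,17,16,15,14,13,12,11,10,9,8,7,6,5,4,3,2,1,0]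

def pairsB : List (Nat × Nat) :=
  [(0,441),(1,882),(2,861),(3,771),(4,959),(5,711),(6,55),(7,110),(8,220),(9,440),(10,880),
   (11,857),(12,779),(13,943),(14,743),(15,119),(16,238),(17,476),(18,952),(19,713),(20,43),
   (21,86),(22,172),(23,344),(24,688),(25,217)]

theorem foldA_bridge (n : Int) : ∀ (is : List Nat), (∀ i ∈ is, i < 26) → ∀ (r : Nat),
    (is.map (fun i : Nat => Int.ofNat i)).foldl (stepA n) (Int.ofNat r)
      = Int.ofNat (runA r (is.map (bitN (mval n)))) := by
  intro is
  induction is with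
  | nil => intro _ r; rfl
  | cons i is ih =>
    intro h r
    simp only [List.map_cons, List.foldl_cons]
    have h1 : runA r (bitN (mval n) i :: is.map (bitN (mval n)))
        = runA (stepN r (bitN (mval n) i)) (is.map (bitN (mval n))) := by
      simp [runA]
    rw [h1, show stepA n (Int.ofNat r) (Int.ofNat i) = Int.ofNat (stepN r (bitN (mval n) i)) from
      step_bridge n r i (h i List.mem_cons_self)]
    exact ih (fun j hj => h j (List.mem_cons_of_mem _ hj)) _

theorem stepB_bridge (n : Int) (s ci i : Nat) (hi : i < 26) :
    stepB n (Int.ofNat s) (Int.ofNat i, Int.ofNat ci)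
      = Int.ofNat (if bitN (mval n) i ≠ 0 then s ^^^ ci else s) := by
  simp only [stepB]
  rw [show (Int.ofNat i).toNat = i from Int.toNat_natCast i]
  rw [show PySem.Int.band (n >>> i) 1 = Int.ofNat (bitN (mval n) i) from bit_bridge n i hi]
  have hio : ∀ x : Nat, Int.ofNat x ≠ 0 ↔ x ≠ 0 := fun x => by
    rw [show Int.ofNat x = (x : Int) from rfl, Ne, Int.natCast_eq_zero]
  by_cases h : bitN (mval n) i = 0
  · simp [h]
  · rw [if_pos ((hio _).mpr h), if_pos h]
    exact PySem.Int.bxor_natCast s ci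

theorem foldB_bridge (n : Int) : ∀ (ps : List (Nat × Nat)), (∀ p ∈ ps, p.1 < 26) → ∀ (s : Nat),
    (ps.map (fun p : Nat × Nat => ((Int.ofNat p.1), (Int.ofNat p.2)))).foldl (stepB n) (Int.ofNat s)
      = Int.ofNat (ps.foldl (fun s p => if bitN (mval n) p.1 ≠ 0 then s ^^^ p.2 else s) s) := by
  intro ps
  induction ps with
  | nil => intro _ s; rfl
  | cons p ps ih =>
    intro h s
    simp only [List.map_cons, List.foldl_cons]
    rw [show stepB n (Int.ofNat s) (Int.ofNat p.1, Int.ofNat p.2)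
        = Int.ofNat (if bitN (mval n) p.1 ≠ 0 then s ^^^ p.2 else s) from
      stepB_bridge n s p.2 p.1 (h p List.mem_cons_self)]
    exact ih (fun q hq => h q (List.mem_cons_of_mem _ hq)) _

theorem iteB (c : Prop) [Decidable c] (s v : Nat) :
    (if c then s ^^^ v else s) = s ^^^ (if c then v else 0) := by
  split <;> simp

set_option maxHeartbeats 2000000 in
set_option maxRecDepth 8192 in
theorem nat_core (m : Nat) : S (bitsIdx.map (bitN m))
    = pairsB.foldl (fun s p => if bitN m p.1 ≠ 0 then s ^^^ p.2 else s) 0 := by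
  have c0 : Ctab 0 = 441 := by decide
  have c1 : Ctab 1 = 882 := by decide
  have c2 : Ctab 2 = 861 := by decide
  have c3 : Ctab 3 = 771 := by decide
  have c4 : Ctab 4 = 959 := by decide
  have c5 : Ctab 5 = 711 := by decide
  have c6 : Ctab 6 = 55 := by decide
  have c7 : Ctab 7 = 110 := by decide
  have c8 : Ctab 8 = 220 := by decide
  have c9 : Ctab 9 = 440 := by decide
  have c10 : Ctab 10 = 880 := by decide
  have c11 : Ctab 11 = 857 := by decide
  have c12 : Ctab 12 = 779 := by decide
  have c13 : Ctab 13 = 943 := by decide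
  have c14 : Ctab 14 = 743 := by decide
  have c15 : Ctab 15 = 119 := by decide
  have c16 : Ctab 16 = 238 := by decide
  have c17 : Ctab 17 = 476 := by decide
  have c18 : Ctab 18 = 952 := by decide
  have c19 : Ctab 19 = 713 := by decide
  have c20 : Ctab 20 = 43 := by decide
  have c21 : Ctab 21 = 86 := by decide
  have c22 : Ctab 22 = 172 := by decide
  have c23 : Ctab 23 = 344 := by decide
  have c24 : Ctab 24 = 688 := by decide
  have c25 : Ctab 25 = 217 := by decide
  simp only [bitsIdx, pairsB, List.map_cons, List.map_nil, S, List.length_cons, List.length_map,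
    List.length_nil, List.foldl_cons, List.foldl_nil, iteB,
    c0, c1, c2, c3, c4, c5, c6, c7, c8, c9, c10, c11, c12, c13, c14, c15, c16, c17, c18, c19,
    c20, c21, c22, c23, c24, c25]
  simp [Nat.xor_assoc, Nat.xor_comm, xor_left_comm]

set_option maxRecDepth 8192 in
theorem ports_agree (n : Int) : compute_rds_crc_syndrome n = compute_rds_crc_syndrome_alt n := by
  have hrange : PySem.List.pyRange 25 (-1) (-1) = bitsIdx.map (fun i : Nat => Int.ofNat i) := by decide
  have henum : PySem.List.enumerate rdsBitSyndromes
      = pairsB.map (fun p : Nat × Nat => ((Int.ofNat p.1), (Int.ofNat p.2))) := by decide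
  have hA : compute_rds_crc_syndrome n = Int.ofNat (runA 0 (bitsIdx.map (bitN (mval n)))) := by
    rw [compute_rds_crc_syndrome, hrange]
    exact foldA_bridge n bitsIdx (by decide) 0
  have hB : compute_rds_crc_syndrome_alt n
      = Int.ofNat (pairsB.foldl (fun s p => if bitN (mval n) p.1 ≠ 0 then s ^^^ p.2 else s) 0) := by
    rw [compute_rds_crc_syndrome_alt, henum]
    exact foldB_bridge n pairsB (by decide) 0
  rw [hA, hB]
  congr 1
  rw [runA_zero_eq_S _ (by
    intro b hb
    simp only [List.mem_map] at hb
    obtain ⟨i, _, rfl⟩ := hb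
    exact Nat.and_le_right)]
  exact nat_core (mval n)

-- ===== VERDICT (by name: the statement is the Claim_ definition above) =====
theorem compute_rds_crc_syndrome_spec : Claim_equal_compute_rds_crc_syndrome := by
  intro bits_26 _
  unfold Spec_compute_rds_crc_syndrome
  exact ports_agree bits_26
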